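-- pv_equiv track=rewrite | github.com/AlanValdevenito/Teoria-de-Algoritmos | SEGUNDA-CURSADA/PARCIALES/PRIMER-PARCIAL/2-GREEDY/2024-2C-4.py | asignar_proyectos
-- ===== SOURCE A (Python) =====
-- INICIO = 0
--
-- FIN = 1
--
-- ULTIMO = -1
--
-- def hay_interseccion(p1, p2):
--     return (p1[FIN] > p2[INICIO])
--
-- def asignar_proyectos(proyectos, K):
--     proyectos_ordenados = sorted(proyectos, key = lambda p: p[FIN])
--
--     asignaciones = [[] for _ in range(K)]
--     asignados = set()
--
--     for equipo in asignaciones: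
--         for p in proyectos_ordenados:
--
--             if p in asignados:
--                 continue
--
--             if (len(equipo) == 0) or not hay_interseccion(equipo[ULTIMO], p):
--                 equipo.append(p)
--                 asignados.add(p)
--
--     return asignaciones
-- ===== SOURCE B (Python) =====
-- # Single sweep in finish order: each project goes to the leftmost team whose
-- # last assigned project finishes no later than the project's start.
-- INICIO = 0
--
-- FIN = 1
--
-- def asignar_proyectos(proyectos, K):
--     orden = sorted(proyectos, key=lambda p: p[FIN])
--     equipos = [[] for _ in range(K)]
--     vistos = set()
--     for p in orden:
--         if p in vistos:
--             continue
--         vistos.add(p)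
--         for equipo in equipos:
--             if not equipo or equipo[-1][FIN] <= p[INICIO]:
--                 equipo.append(p)
--                 break
--     return equipos
-- ===== Notes on version B (the rewrite author's own statement) =====
-- stated objective: faster
-- what changed: Replaces A's K separate greedy passes over the whole project list (one pass per team, re-scanning every project each time) with a single sweep over the finish-sorted projects that drops each project into the leftmost compatible team.
import Mathlib
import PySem

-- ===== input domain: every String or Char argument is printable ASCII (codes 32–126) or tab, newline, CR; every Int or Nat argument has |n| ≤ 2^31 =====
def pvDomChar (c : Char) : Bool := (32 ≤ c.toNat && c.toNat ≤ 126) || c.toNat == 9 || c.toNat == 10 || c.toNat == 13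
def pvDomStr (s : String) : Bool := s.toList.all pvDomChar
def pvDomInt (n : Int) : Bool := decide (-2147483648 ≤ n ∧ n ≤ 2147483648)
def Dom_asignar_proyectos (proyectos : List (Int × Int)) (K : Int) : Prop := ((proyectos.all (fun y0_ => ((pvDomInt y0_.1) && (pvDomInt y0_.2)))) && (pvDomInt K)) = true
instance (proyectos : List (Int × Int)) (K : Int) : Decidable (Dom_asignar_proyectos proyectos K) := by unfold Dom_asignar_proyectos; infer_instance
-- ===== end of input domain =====

-- B replaces A's K greedy passes over the whole project list with one sweep over the
-- finish-sorted projects, assigning each project to the leftmost compatible team.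

-- ===== PORT A =====
-- equipo[-1] (only evaluated under a nonemptiness guard in both programs)
def pvUltimo (l : List (Int × Int)) : Int × Int := (PySem.List.pyGet? l (-1)).getD (0, 0)

def hay_interseccion (p1 p2 : Int × Int) : Bool := decide (p1.2 > p2.1)

-- body of A's inner loop: state = (equipo, asignados)
def pasoA (st : List (Int × Int) × PySem.Set (Int × Int)) (p : Int × Int) :
    List (Int × Int) × PySem.Set (Int × Int) :=
  if PySem.Set.contains st.2 p then st
  else if (st.1.length == 0) || !(hay_interseccion (pvUltimo st.1) p) then
    (st.1 ++ [p], PySem.Set.add st.2 p)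
  else st

def asignar_proyectos (proyectos : List (Int × Int)) (K : Int) : List (List (Int × Int)) :=
  let proyectos_ordenados := PySem.List.sorted proyectos (fun p => p.2)
  let asignaciones : List (List (Int × Int)) := (PySem.List.pyRange 0 K 1).map (fun _ => [])
  let r := asignaciones.foldl
      (fun (st : List (List (Int × Int)) × PySem.Set (Int × Int)) equipo =>
        let r2 := proyectos_ordenados.foldl pasoA (equipo, st.2)
        (st.1 ++ [r2.1], r2.2))
      ([], PySem.Set.empty)
  r.1

-- ===== PORT B =====
-- B's inner 'for equipo in equipos: … break': put p into the leftmost compatible team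
def colocar (p : Int × Int) : List (List (Int × Int)) → List (List (Int × Int))
  | [] => []
  | equipo :: resto =>
    if equipo.isEmpty || decide ((pvUltimo equipo).2 ≤ p.1) then (equipo ++ [p]) :: resto
    else equipo :: colocar p resto

def asignar_proyectos_alt (proyectos : List (Int × Int)) (K : Int) : List (List (Int × Int)) :=
  let orden := PySem.List.sorted proyectos (fun p => p.2)
  let equipos : List (List (Int × Int)) := (PySem.List.pyRange 0 K 1).map (fun _ => [])
  let r := orden.foldl
      (fun (st : List (List (Int × Int)) × PySem.Set (Int × Int)) p =>
        if PySem.Set.contains st.2 p then st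
        else (colocar p st.1, PySem.Set.add st.2 p))
      (equipos, PySem.Set.empty)
  r.1

-- ===== PRECONDITION & SPEC =====
def Spec_asignar_proyectos (proyectos : List (Int × Int)) (K : Int) (out : List (List (Int × Int))) : Prop := out = asignar_proyectos_alt proyectos K
instance (proyectos : List (Int × Int)) (K : Int) (out : List (List (Int × Int))) : Decidable (Spec_asignar_proyectos proyectos K out) := by unfold Spec_asignar_proyectos; infer_instance

-- ===== CLAIM (what is proved, stated in full; the proofs are below) =====
def Claim_equal_asignar_proyectos : Prop := ∀ (proyectos : List (Int × Int)) (K : Int), Dom_asignar_proyectos proyectos K → Spec_asignar_proyectos proyectos K (asignar_proyectos proyectos K)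

-- ===== LEMMAS AND PROOFS =====

-- A's inner pass, from team t and seen-set S
def passA (L : List (Int × Int)) (t : List (Int × Int)) (S : PySem.Set (Int × Int)) :
    List (Int × Int) × PySem.Set (Int × Int) := L.foldl pasoA (t, S)

-- A's outer loop, recursively: k teams filled one after another
def teamsA : Nat → List (Int × Int) → PySem.Set (Int × Int) → List (List (Int × Int))
  | 0, _, _ => []
  | Nat.succ k, L, S => (passA L [] S).1 :: teamsA k L (passA L [] S).2

-- B's sweep with explicit state
def sweepB (L : List (Int × Int)) (eqs : List (List (Int × Int))) (S : PySem.Set (Int × Int)) :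
    List (List (Int × Int)) × PySem.Set (Int × Int) :=
  L.foldl
    (fun (st : List (List (Int × Int)) × PySem.Set (Int × Int)) p =>
      if PySem.Set.contains st.2 p then st
      else (colocar p st.1, PySem.Set.add st.2 p))
    (eqs, S)

-- shared compatibility test
def okT (t : List (Int × Int)) (p : Int × Int) : Bool := t.isEmpty || decide ((pvUltimo t).2 ≤ p.1)

def SortedF (L : List (Int × Int)) : Prop := L.Pairwise (fun a b => a.2 ≤ b.2)

def MemEq (S T : PySem.Set (Int × Int)) : Prop := ∀ x : Int × Int, x ∈ S ↔ x ∈ T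

lemma condA_eq_okT (t : List (Int × Int)) (p : Int × Int) :
    ((t.length == 0) || !(hay_interseccion (pvUltimo t) p)) = okT t p := by
  cases t <;> simp [okT, hay_interseccion, ← decide_not, not_lt]

lemma pvUltimo_append (l : List (Int × Int)) (q : Int × Int) : pvUltimo (l ++ [q]) = q := by
  simp [pvUltimo, PySem.List.pyGet?, PySem.List.pyIdx?]

lemma pasoA_mem {S : PySem.Set (Int × Int)} {p : Int × Int} (t : List (Int × Int))
    (h : p ∈ S) : pasoA (t, S) p = (t, S) := by
  simp [pasoA, h]

lemma pasoA_ok {S : PySem.Set (Int × Int)} {p : Int × Int} {t : List (Int × Int)}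
    (h : p ∉ S) (h2 : okT t p = true) : pasoA (t, S) p = (t ++ [p], PySem.Set.add S p) := by
  have hc : PySem.Set.contains S p = false := by simp [h]
  simp only [pasoA, hc, Bool.false_eq_true, if_false, condA_eq_okT, h2, if_true]

lemma pasoA_bad {S : PySem.Set (Int × Int)} {p : Int × Int} {t : List (Int × Int)}
    (h : p ∉ S) (h2 : okT t p = false) : pasoA (t, S) p = (t, S) := by
  have hc : PySem.Set.contains S p = false := by simp [h]
  simp only [pasoA, hc, Bool.false_eq_true, if_false, condA_eq_okT, h2]

lemma pasoA_mem' {p : Int × Int} (st : List (Int × Int) × PySem.Set (Int × Int))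
    (h : p ∈ st.2) : pasoA st p = st := by
  cases st; exact pasoA_mem _ h

lemma pasoA_ok' {p : Int × Int} {st : List (Int × Int) × PySem.Set (Int × Int)}
    (h : p ∉ st.2) (h2 : okT st.1 p = true) :
    pasoA st p = (st.1 ++ [p], PySem.Set.add st.2 p) := by
  cases st; exact pasoA_ok h h2

lemma pasoA_bad' {p : Int × Int} {st : List (Int × Int) × PySem.Set (Int × Int)}
    (h : p ∉ st.2) (h2 : okT st.1 p = false) : pasoA st p = st := by
  cases st; exact pasoA_bad h h2

lemma okT_false {t : List (Int × Int)} {p : Int × Int} (h : okT t p = false) :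
    t ≠ [] ∧ p.1 < (pvUltimo t).2 := by
  simp [okT, not_le] at h; exact h

lemma okT_eq_false {t : List (Int × Int)} {p : Int × Int} (hne : t ≠ [])
    (hlt : p.1 < (pvUltimo t).2) : okT t p = false := by
  simp [okT, hne, not_le]; omega

lemma passA_cons (q : Int × Int) (M : List (Int × Int)) (t : List (Int × Int))
    (S : PySem.Set (Int × Int)) :
    passA (q :: M) t S = passA M (pasoA (t, S) q).1 (pasoA (t, S) q).2 := by
  simp [passA]

lemma colocar_cons_ok {t : List (Int × Int)} {p : Int × Int} (ts : List (List (Int × Int)))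
    (h : okT t p = true) : colocar p (t :: ts) = (t ++ [p]) :: ts := by
  rw [show colocar p (t :: ts) = if t.isEmpty || decide ((pvUltimo t).2 ≤ p.1) then
    (t ++ [p]) :: ts else t :: colocar p ts from rfl]
  unfold okT at h; simp [h]

lemma colocar_cons_bad {t : List (Int × Int)} {p : Int × Int} (ts : List (List (Int × Int)))
    (h : okT t p = false) : colocar p (t :: ts) = t :: colocar p ts := by
  rw [show colocar p (t :: ts) = if t.isEmpty || decide ((pvUltimo t).2 ≤ p.1) then
    (t ++ [p]) :: ts else t :: colocar p ts from rfl]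
  unfold okT at h; simp [h]

lemma sweepB_cons (q : Int × Int) (M : List (Int × Int)) (eqs : List (List (Int × Int)))
    (S : PySem.Set (Int × Int)) :
    sweepB (q :: M) eqs S =
      if q ∈ S then sweepB M eqs S else sweepB M (colocar q eqs) (PySem.Set.add S q) := by
  by_cases hq : q ∈ S <;> simp [sweepB, hq]

lemma passA_append (M : List (Int × Int)) (p : Int × Int) (t : List (Int × Int))
    (S : PySem.Set (Int × Int)) :
    passA (M ++ [p]) t S = pasoA (passA M t S) p := by
  simp [passA, List.foldl_append]

-- seen-set only grows
lemma passA_seen_mono (L : List (Int × Int)) (t : List (Int × Int)) (S : PySem.Set (Int × Int))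
    {x : Int × Int} (h : x ∈ S) : x ∈ (passA L t S).2 := by
  induction L generalizing t S with
  | nil => simpa [passA] using h
  | cons q M ih =>
    rw [passA_cons]
    apply ih
    unfold pasoA; split
    · exact h
    · split
      · exact (PySem.Set.mem_add _ _ _).mpr (Or.inl h)
      · exact h

-- everything in the final seen-set came from S or from L
lemma passA_seen_subset (L : List (Int × Int)) (t : List (Int × Int)) (S : PySem.Set (Int × Int))
    {x : Int × Int} (h : x ∈ (passA L t S).2) : x ∈ S ∨ x ∈ L := by
  induction L generalizing t S with
  | nil => exact Or.inl (by simpa [passA] using h)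
  | cons q M ih =>
    rw [passA_cons] at h
    rcases ih _ _ h with hx | hx
    · revert hx; unfold pasoA; split
      · exact fun hx => Or.inl hx
      · split
        · intro hx
          rcases (PySem.Set.mem_add _ _ _).mp hx with hx | rfl
          · exact Or.inl hx
          · exact Or.inr (List.mem_cons_self)
        · exact fun hx => Or.inl hx
    · exact Or.inr (List.mem_cons_of_mem _ hx)

-- once the team's last finish exceeds x.1 and all remaining finishes do too, it stays so
lemma passA_bad_pres (L : List (Int × Int)) (t : List (Int × Int)) (S : PySem.Set (Int × Int))
    (x : Int × Int) (ht : t ≠ []) (hlast : x.1 < (pvUltimo t).2) (hL : ∀ q ∈ L, x.1 < q.2) :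
    (passA L t S).1 ≠ [] ∧ x.1 < (pvUltimo (passA L t S).1).2 := by
  induction L generalizing t S with
  | nil => exact ⟨ht, hlast⟩
  | cons q M ih =>
    rw [passA_cons]
    by_cases hq : q ∈ S
    · rw [pasoA_mem t hq]
      exact ih t S ht hlast (fun r hr => hL r (List.mem_cons_of_mem _ hr))
    · by_cases hok : okT t q = true
      · rw [pasoA_ok hq hok]
        refine ih _ _ (by simp) ?_ (fun r hr => hL r (List.mem_cons_of_mem _ hr))
        rw [pvUltimo_append]
        exact hL q List.mem_cons_self
      · rw [pasoA_bad hq (Bool.eq_false_iff.mpr hok)]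
        exact ih t S ht hlast (fun r hr => hL r (List.mem_cons_of_mem _ hr))

-- a value occurring in the (sorted) pass list is, afterwards, seen or incompatible
lemma passA_dup (L : List (Int × Int)) (t : List (Int × Int)) (S : PySem.Set (Int × Int))
    (p : Int × Int) (hs : SortedF L) (hp : p ∈ L)
    (hinv : t = [] ∨ ∀ q ∈ L, (pvUltimo t).2 ≤ q.2) :
    p ∈ (passA L t S).2 ∨ ((passA L t S).1 ≠ [] ∧ p.1 < (pvUltimo (passA L t S).1).2) := by
  induction L generalizing t S with
  | nil => cases hp
  | cons q M ih =>
    have hq2 : ∀ r ∈ M, q.2 ≤ r.2 := (List.pairwise_cons.mp hs).1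
    have hsM : SortedF M := (List.pairwise_cons.mp hs).2
    have hinvM : ∀ t' : List (Int × Int), (t' = [] ∨ ∀ r ∈ (q :: M), (pvUltimo t').2 ≤ r.2) →
        (t' = [] ∨ ∀ r ∈ M, (pvUltimo t').2 ≤ r.2) := by
      rintro t' (rfl | h)
      · exact Or.inl rfl
      · exact Or.inr (fun r hr => h r (List.mem_cons_of_mem _ hr))
    rw [passA_cons]
    by_cases hqS : q ∈ S
    · rw [pasoA_mem t hqS]
      rcases List.mem_cons.mp hp with rfl | hpM
      · exact Or.inl (passA_seen_mono M t S hqS)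
      · exact ih t S hsM hpM (hinvM t hinv)
    · by_cases hok : okT t q = true
      · rw [pasoA_ok hqS hok]
        rcases List.mem_cons.mp hp with rfl | hpM
        · exact Or.inl (passA_seen_mono M _ _ ((PySem.Set.mem_add _ _ _).mpr (Or.inr rfl)))
        · refine ih _ _ hsM hpM (Or.inr ?_)
          intro r hr; rw [pvUltimo_append]; exact hq2 r hr
      · have hokf : okT t q = false := Bool.eq_false_iff.mpr hok
        rw [pasoA_bad hqS hokf]
        obtain ⟨hne, hlt⟩ := okT_false hokf
        rcases List.mem_cons.mp hp with rfl | hpM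
        · rcases hinv with rfl | hinv
          · exact absurd rfl hne
          · refine Or.inr (passA_bad_pres M t S p hne hlt ?_)
            intro r hr
            exact lt_of_lt_of_le hlt (le_trans (hinv p List.mem_cons_self) (hq2 r hr))
        · exact ih t S hsM hpM (hinvM t hinv)

-- the pass depends on the seen-set only through membership
lemma passA_congr (L : List (Int × Int)) (t : List (Int × Int)) (S T : PySem.Set (Int × Int))
    (h : MemEq S T) :
    (passA L t S).1 = (passA L t T).1 ∧ MemEq (passA L t S).2 (passA L t T).2 := by
  induction L generalizing t S T with
  | nil => exact ⟨rfl, h⟩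
  | cons q M ih =>
    rw [passA_cons, passA_cons]
    by_cases hq : q ∈ S
    · rw [pasoA_mem t hq, pasoA_mem t ((h q).mp hq)]
      exact ih t S T h
    · have hqT : q ∉ T := fun hx => hq ((h q).mpr hx)
      by_cases hok : okT t q = true
      · rw [pasoA_ok hq hok, pasoA_ok hqT hok]
        refine ih _ _ _ ?_
        intro x
        rw [PySem.Set.mem_add _ _ _, PySem.Set.mem_add _ _ _, h x]
      · have hokf : okT t q = false := Bool.eq_false_iff.mpr hok
        rw [pasoA_bad hq hokf, pasoA_bad hqT hokf]
        exact ih t S T h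

-- pre-marking a value absent from L as seen changes nothing but the seen-set
lemma passA_fresh (L : List (Int × Int)) (t : List (Int × Int)) (S : PySem.Set (Int × Int))
    (p : Int × Int) (hp : p ∉ L) :
    (passA L t (PySem.Set.add S p)).1 = (passA L t S).1 ∧
      MemEq (passA L t (PySem.Set.add S p)).2 (PySem.Set.add (passA L t S).2 p) := by
  induction L generalizing t S with
  | nil => exact ⟨rfl, fun x => Iff.rfl⟩
  | cons q M ih =>
    have hqp : q ≠ p := fun h => hp (h ▸ List.mem_cons_self)
    have hpM : p ∉ M := fun h => hp (List.mem_cons_of_mem _ h)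
    rw [passA_cons, passA_cons]
    by_cases hq : q ∈ S
    · rw [pasoA_mem t hq, pasoA_mem t ((PySem.Set.mem_add _ _ _).mpr (Or.inl hq))]
      exact ih t S hpM
    · have hq' : q ∉ PySem.Set.add S p := by
        rw [PySem.Set.mem_add _ _ _]; rintro (h | h); exact hq h; exact hqp h
      by_cases hok : okT t q = true
      · rw [pasoA_ok hq hok, pasoA_ok hq' hok]
        have hswap : MemEq (PySem.Set.add (PySem.Set.add S p) q) (PySem.Set.add (PySem.Set.add S q) p) := by
          intro x; simp only [PySem.Set.mem_add _ _ _]; tauto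
        have hc := passA_congr M (t ++ [q]) _ _ hswap
        have hi := ih (t ++ [q]) (PySem.Set.add S q) hpM
        exact ⟨hc.1.trans hi.1, fun x => (hc.2 x).trans (hi.2 x)⟩
      · have hokf : okT t q = false := Bool.eq_false_iff.mpr hok
        rw [pasoA_bad hq hokf, pasoA_bad hq' hokf]
        exact ih t S hpM

lemma teamsA_congr (k : Nat) (L : List (Int × Int)) (S T : PySem.Set (Int × Int))
    (h : MemEq S T) : teamsA k L S = teamsA k L T := by
  induction k generalizing S T with
  | zero => rfl
  | succ k ih =>
    have hc := passA_congr L [] S T h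
    simp only [teamsA, hc.1]
    rw [ih _ _ hc.2]

lemma teamsA_fresh (k : Nat) (L : List (Int × Int)) (S : PySem.Set (Int × Int))
    (p : Int × Int) (hp : p ∉ L) : teamsA k L (PySem.Set.add S p) = teamsA k L S := by
  induction k generalizing S with
  | zero => rfl
  | succ k ih =>
    have hf := passA_fresh L [] S p hp
    simp only [teamsA, hf.1]
    rw [teamsA_congr k L _ _ hf.2, ih]

lemma teamsA_inS (k : Nat) (M : List (Int × Int)) (S : PySem.Set (Int × Int))
    (p : Int × Int) (hp : p ∈ S) : teamsA k (M ++ [p]) S = teamsA k M S := by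
  induction k generalizing S with
  | zero => rfl
  | succ k ih =>
    have hmem : p ∈ (passA M [] S).2 := passA_seen_mono M [] S hp
    simp only [teamsA, passA_append, pasoA_mem' _ hmem]
    rw [ih _ hmem]

lemma teamsA_snoc_mem (M : List (Int × Int)) (p : Int × Int) (hs : SortedF (M ++ [p]))
    (hp : p ∈ M) (k : Nat) (S : PySem.Set (Int × Int)) :
    teamsA k (M ++ [p]) S = teamsA k M S := by
  have hsM : SortedF M := (List.pairwise_append.mp hs).1
  induction k generalizing S with
  | zero => rfl
  | succ k ih =>
    have hstep : pasoA (passA M [] S) p = passA M [] S := by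
      by_cases hm : p ∈ (passA M [] S).2
      · exact pasoA_mem' _ hm
      · rcases passA_dup M [] S p hsM hp (Or.inl rfl) with hin | ⟨hne, hlt⟩
        · exact absurd hin hm
        · exact pasoA_bad' hm (okT_eq_false hne hlt)
    simp only [teamsA, passA_append, hstep]
    rw [ih _]

lemma teamsA_snoc_fresh (M : List (Int × Int)) (p : Int × Int) (hp : p ∉ M) (k : Nat)
    (S : PySem.Set (Int × Int)) (hS : p ∉ S) :
    teamsA k (M ++ [p]) S = colocar p (teamsA k M S) := by
  induction k generalizing S with
  | zero => simp [teamsA, colocar]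
  | succ k ih =>
    have hpr : p ∉ (passA M [] S).2 := by
      intro h
      rcases passA_seen_subset M [] S h with h | h
      · exact hS h
      · exact hp h
    by_cases hok : okT (passA M [] S).1 p = true
    · simp only [teamsA, passA_append, pasoA_ok' hpr hok]
      rw [colocar_cons_ok _ hok]
      rw [teamsA_inS k M _ p ((PySem.Set.mem_add _ _ _).mpr (Or.inr rfl)), teamsA_fresh k M _ p hp]
    · have hokf : okT (passA M [] S).1 p = false := Bool.eq_false_iff.mpr hok
      simp only [teamsA, passA_append, pasoA_bad' hpr hokf]
      rw [colocar_cons_bad _ hokf, ih _ hpr]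

lemma teamsA_nil (k : Nat) (S : PySem.Set (Int × Int)) :
    teamsA k [] S = List.replicate k [] := by
  induction k generalizing S with
  | zero => rfl
  | succ k ih => simp [teamsA, passA, List.replicate_succ, ih]

lemma sweepB_seen (L : List (Int × Int)) (eqs : List (List (Int × Int)))
    (S : PySem.Set (Int × Int)) (x : Int × Int) :
    x ∈ (sweepB L eqs S).2 ↔ x ∈ S ∨ x ∈ L := by
  induction L generalizing eqs S with
  | nil => simp [sweepB]
  | cons q M ih =>
    rw [sweepB_cons]
    by_cases hq : q ∈ S
    · rw [if_pos hq, ih]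
      constructor
      · rintro (h | h)
        · exact Or.inl h
        · exact Or.inr (List.mem_cons_of_mem _ h)
      · rintro (h | h)
        · exact Or.inl h
        · rcases List.mem_cons.mp h with rfl | h
          · exact Or.inl hq
          · exact Or.inr h
    · rw [if_neg hq, ih]
      simp only [PySem.Set.mem_add _ _ _, List.mem_cons]
      tauto

lemma sweepB_append (M : List (Int × Int)) (p : Int × Int) (eqs : List (List (Int × Int)))
    (S : PySem.Set (Int × Int)) :
    sweepB (M ++ [p]) eqs S =
      (if PySem.Set.contains (sweepB M eqs S).2 p then sweepB M eqs S
       else (colocar p (sweepB M eqs S).1, PySem.Set.add (sweepB M eqs S).2 p)) := by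
  rw [sweepB, List.foldl_append]
  rfl

-- the heart: on a finish-sorted list, A's K passes equal B's single sweep
lemma key_equiv : ∀ L : List (Int × Int), SortedF L → ∀ k : Nat,
    teamsA k L PySem.Set.empty = (sweepB L (List.replicate k []) PySem.Set.empty).1 := by
  intro L
  induction L using List.reverseRecOn with
  | nil => intro _ k; simp [teamsA_nil, sweepB]
  | append_singleton M p ih =>
    intro hs k
    have hsM : SortedF M := (List.pairwise_append.mp hs).1
    rw [sweepB_append]
    by_cases hp : p ∈ M
    · have hmem : p ∈ (sweepB M (List.replicate k []) PySem.Set.empty).2 :=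
        (sweepB_seen M _ _ p).mpr (Or.inr hp)
      rw [if_pos (by simpa using hmem)]
      rw [teamsA_snoc_mem M p hs hp k PySem.Set.empty, ih hsM k]
    · have hmem : p ∉ (sweepB M (List.replicate k []) PySem.Set.empty).2 := by
        rw [sweepB_seen M _ _ p]
        rintro (h | h)
        · simp [PySem.Set.empty] at h
        · exact hp h
      rw [if_neg (by simpa using hmem)]
      rw [teamsA_snoc_fresh M p hp k PySem.Set.empty (by simp [PySem.Set.empty]), ih hsM k]

-- bridge from port A's fold to teamsA
lemma bridgeA (L : List (Int × Int)) :
    ∀ (l : List (List (Int × Int))), (∀ e ∈ l, e = []) →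
      ∀ (done : List (List (Int × Int))) (S : PySem.Set (Int × Int)),
        (l.foldl
          (fun (st : List (List (Int × Int)) × PySem.Set (Int × Int)) equipo =>
            let r2 := L.foldl pasoA (equipo, st.2)
            (st.1 ++ [r2.1], r2.2))
          (done, S)).1 = done ++ teamsA l.length L S := by
  intro l
  induction l with
  | nil => intro _ done S; simp [teamsA]
  | cons e l ih =>
    intro he done S
    have heq : e = [] := he e List.mem_cons_self
    subst heq
    rw [List.foldl_cons]
    rw [ih (fun e h => he e (List.mem_cons_of_mem _ h))]
    simp [teamsA, passA, List.append_assoc]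

-- ===== VERDICT (by name: the statement is the Claim_ definition above) =====
theorem asignar_proyectos_spec : Claim_equal_asignar_proyectos := by
  intro proyectos K _hdom
  unfold Spec_asignar_proyectos asignar_proyectos asignar_proyectos_alt
  have hsort : SortedF (PySem.List.sorted proyectos (fun p => p.2)) :=
    PySem.List.sorted_pairwise proyectos (fun p => p.2)
  have hempty : ∀ e ∈ (PySem.List.pyRange 0 K 1).map
      (fun _ => ([] : List (Int × Int))), e = ([] : List (Int × Int)) := by
    intro e he
    rcases List.mem_map.mp he with ⟨_, _, rfl⟩
    rfl
  rw [bridgeA _ _ hempty]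
  have hrepl : (PySem.List.pyRange 0 K 1).map (fun _ => ([] : List (Int × Int))) =
      List.replicate ((PySem.List.pyRange 0 K 1).map (fun _ => ([] : List (Int × Int)))).length [] := by
    simp
  calc [] ++ teamsA ((PySem.List.pyRange 0 K 1).map (fun _ => ([] : List (Int × Int)))).length
        (PySem.List.sorted proyectos (fun p => p.2)) PySem.Set.empty
      = (sweepB (PySem.List.sorted proyectos (fun p => p.2))
          (List.replicate ((PySem.List.pyRange 0 K 1).map (fun _ => ([] : List (Int × Int)))).length [])
          PySem.Set.empty).1 := by
        rw [List.nil_append, key_equiv _ hsort]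
    _ = _ := by rw [← hrepl]; rfl
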